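-- pv_equiv track=rewrite | github.com/lucaswh-msft/chatbot-demo | backend/main.py | extract_specification_groups_from_text
-- ===== SOURCE A (Python) =====
-- from typing import List, Optional, Dict
--
-- def extract_specification_groups_from_text(text: str) -> List[str]:
--     """Search the provided text for occurrences of the exact substring
--     '"specificationGroups": [{' and for each occurrence return the full JSON
--     array string by scanning forward and counting brackets until the matching
--     closing bracket for the array is found.
--     """
--     results: List[str] = []
--     # Match the exact escaped sequence: "specificationGroups":[{
--     search_term = '"specificationGroups":[{'
--     start = 0
--     n = len(text)
--     while True:
--         idx = text.find(search_term, start)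
--         if idx == -1:
--             break
--
--         # Find the '[' that begins the array; start scanning from that position
--         array_start = text.find('[', idx)
--         if array_start == -1:
--             # malformed, give up for this occurrence
--             start = idx + len(search_term)
--             continue
--
--         i = array_start
--         bracket_count = 0
--         # Walk forward counting brackets until the top-level array is closed
--         while i < n:
--             ch = text[i]
--             if ch == '[':
--                 bracket_count += 1
--             elif ch == ']':
--                 bracket_count -= 1
--                 if bracket_count == 0:
--                     # capture the array from '[' .. ']' inclusive
--                     results.append(text[array_start:i+1])
--                     start = i + 1
--                     break
--             i += 1
--         else:
--             # Reached end of text without closing bracket; stop searching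
--             break
--
--     return results
-- ===== SOURCE B (Python) =====
-- from typing import List
--
--
-- def extract_specification_groups_from_text(text: str) -> List[str]:
--     """Single linear pass with an 'armed' state machine instead of repeated
--     find() calls with a nested bracket-scanning loop."""
--     search_term = '"specificationGroups":[{'
--     results: List[str] = []
--     n = len(text)
--     i = 0
--     armed = False
--     array_start = 0
--     depth = 0
--     while i < n:
--         if not armed:
--             if text.startswith(search_term, i):
--                 armed = True
--                 array_start = i + 22  # position of the '[' inside the literal
--                 depth = 1             # counts that '['
--                 i += 23               # resume right after the '['
--             else:
--                 i += 1
--         else: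
--             ch = text[i]
--             if ch == '[':
--                 depth += 1
--             elif ch == ']':
--                 depth -= 1
--                 if depth == 0:
--                     results.append(text[array_start:i + 1])
--                     armed = False
--             i += 1
--     return results
-- ===== Notes on version B (the rewrite author's own statement) =====
-- stated objective: alternative
-- what changed: Replaced A's repeated str.find calls (outer while-True loop re-searching the text) plus a nested bracket-counting loop by a single linear pass over the string with an armed/array_start/depth state machine.
import Mathlib
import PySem

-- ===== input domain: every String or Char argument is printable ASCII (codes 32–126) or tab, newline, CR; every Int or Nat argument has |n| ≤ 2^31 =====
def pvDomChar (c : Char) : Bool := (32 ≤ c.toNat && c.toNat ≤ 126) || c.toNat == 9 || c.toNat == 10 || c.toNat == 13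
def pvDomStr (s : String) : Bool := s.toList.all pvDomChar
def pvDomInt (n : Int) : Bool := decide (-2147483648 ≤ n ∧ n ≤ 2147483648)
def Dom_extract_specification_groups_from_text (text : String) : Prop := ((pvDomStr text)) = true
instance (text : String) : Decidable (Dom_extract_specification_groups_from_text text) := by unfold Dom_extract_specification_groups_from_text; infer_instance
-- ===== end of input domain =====

-- B replaces A's repeated find() calls plus a nested bracket loop by one linear pass with an
-- armed/depth state machine (objective: alternative decomposition, same return value).

-- the exact literal both programs search for
def pvTerm : List Char := "\"specificationGroups\":[{".toList

-- ===== PORT A =====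
-- A's inner `while i < n` bracket-counting loop; returns the index of the closing ']'
-- (where bracket_count hits 0), or none if the text ends first.
def pvInnerA (s : List Char) (i : Nat) (cnt : Int) : Option Nat :=
  if h : i < s.length then
    if s[i] = '[' then pvInnerA s (i+1) (cnt+1)
    else if s[i] = ']' then
      if cnt - 1 = 0 then some i else pvInnerA s (i+1) (cnt-1)
    else pvInnerA s (i+1) cnt
  else none
termination_by s.length - i

-- A's outer `while True` loop over `start`, with `results` as accumulator; `fuel` only makes
-- the recursion total (start strictly increases each iteration, so length+2 fuel never runs out).
def pvOuterA (s : List Char) (fuel : Nat) (start : Nat) (acc : List (List Char)) : List (List Char) :=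
  match fuel with
  | 0 => acc
  | fuel + 1 =>
    let idx := PySem.Chars.findFrom s pvTerm (start : Int)
    if idx = -1 then acc
    else
      let arrayStart := PySem.Chars.findFrom s ['['] idx
      if arrayStart = -1 then pvOuterA s fuel (idx.toNat + 24) acc
      else
        match pvInnerA s arrayStart.toNat 0 with
        | some close =>
            pvOuterA s fuel (close + 1)
              (acc ++ [PySem.List.slice s (some arrayStart) (some ((close : Int) + 1))])
        | none => acc

def extract_specification_groups_from_text (text : String) : List String :=
  (pvOuterA text.toList (text.toList.length + 2) 0 []).map String.ofList

-- ===== PORT B =====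
-- B's single `while i < n` loop: the whole mutable state (i, armed, array_start, depth) becomes
-- the parameters of one recursion; results are produced in order by consing at each close.
def pvLoopB (s : List Char) (i : Nat) (armed : Bool) (arrayStart : Nat) (depth : Int) : List (List Char) :=
  if h : i < s.length then
    if armed = false then
      if PySem.Chars.startswith (s.drop i) pvTerm then
        pvLoopB s (i+23) true (i+22) 1
      else pvLoopB s (i+1) false arrayStart depth
    else
      if s[i] = '[' then pvLoopB s (i+1) true arrayStart (depth+1)
      else if s[i] = ']' then
        if depth - 1 = 0 then
          PySem.List.slice s (some (arrayStart : Int)) (some ((i : Int) + 1)) ::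
            pvLoopB s (i+1) false arrayStart (depth-1)
        else pvLoopB s (i+1) true arrayStart (depth-1)
      else pvLoopB s (i+1) true arrayStart depth
  else []
termination_by s.length + 24 - i
decreasing_by all_goals omega

def extract_specification_groups_from_text_alt (text : String) : List String :=
  (pvLoopB text.toList 0 false 0 0).map String.ofList

-- ===== PRECONDITION & SPEC =====
def Spec_extract_specification_groups_from_text (text : String) (out : List String) : Prop := out = extract_specification_groups_from_text_alt text
instance (text : String) (out : List String) : Decidable (Spec_extract_specification_groups_from_text text out) := by unfold Spec_extract_specification_groups_from_text; infer_instance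

-- ===== CLAIM (what is proved, stated in full; the proofs are below) =====
def Claim_equal_extract_specification_groups_from_text : Prop := ∀ (text : String), Dom_extract_specification_groups_from_text text → Spec_extract_specification_groups_from_text text (extract_specification_groups_from_text text)

-- ===== LEMMAS AND PROOFS =====

theorem pvTerm_len : pvTerm.length = 24 := by decide

theorem pvTerm_no_bracket : ∀ j, j < 22 → pvTerm[j]? ≠ some '[' := by decide

-- while unarmed, pvLoopB ignores arrayStart and depth
theorem pvLoopB_unarmed_irrel (s : List Char) (i : Nat) (a d a' d')
    : pvLoopB s i false a d = pvLoopB s i false a' d' := by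
  rw [pvLoopB]; conv_rhs => rw [pvLoopB]
  by_cases hin : i < s.length
  · rw [dif_pos hin, dif_pos hin]
    simp only [reduceIte]
    by_cases hsw : PySem.Chars.startswith (List.drop i s) pvTerm = true
    · rw [if_pos hsw, if_pos hsw]
    · rw [if_neg hsw, if_neg hsw]
      exact pvLoopB_unarmed_irrel s (i+1) a d a' d'
  · rw [dif_neg hin, dif_neg hin]
termination_by s.length - i

theorem pvInnerA_bounds (s : List Char) (i : Nat) (cnt : Int) (c : Nat)
    (h : pvInnerA s i cnt = some c) : i ≤ c ∧ c < s.length := by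
  rw [pvInnerA] at h
  split at h
  · rename_i hin
    split at h
    · have := pvInnerA_bounds s (i+1) (cnt+1) c h; omega
    · split at h
      · split at h
        · cases h; omega
        · have := pvInnerA_bounds s (i+1) (cnt-1) c h; omega
      · have := pvInnerA_bounds s (i+1) cnt c h; omega
  · cases h
termination_by s.length - i

-- the armed phase of pvLoopB is exactly A's inner bracket loop
theorem pvArmed_eq (s : List Char) (i as : Nat) (depth : Int)
    : pvLoopB s i true as depth =
      match pvInnerA s i depth with
      | none => []
      | some c => PySem.List.slice s (some (as : Int)) (some ((c : Int) + 1)) ::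
                    pvLoopB s (c+1) false as 0 := by
  rw [pvLoopB, pvInnerA]
  split
  · rename_i hin
    simp only [Bool.true_eq_false, if_false]
    split
    · exact pvArmed_eq s (i+1) as (depth+1)
    · split
      · split
        · rename_i hz
          simp only [hz]
        · exact pvArmed_eq s (i+1) as (depth-1)
      · exact pvArmed_eq s (i+1) as depth
  · rfl
termination_by s.length - i

-- skipping over positions with no occurrence of the literal
theorem pvSkip_eq (s : List Char) (i m a : Nat) (d : Int) (him : i ≤ m) (hm : m ≤ s.length)
    (hno : ∀ j, i ≤ j → j < m → ¬ pvTerm <+: s.drop j)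
    : pvLoopB s i false a d = pvLoopB s m false a d := by
  rcases Nat.eq_or_lt_of_le him with h | h
  · rw [h]
  · rw [pvLoopB]
    have hin : i < s.length := by omega
    rw [dif_pos hin]
    simp only [reduceIte]
    have hsw : PySem.Chars.startswith (s.drop i) pvTerm = false := by
      rw [Bool.eq_false_iff]
      intro hc
      exact hno i le_rfl h ((PySem.Chars.startswith_iff _ _).mp hc)
    rw [hsw]
    simp only [Bool.false_eq_true, if_false]
    exact pvSkip_eq s (i+1) m a d h hm (fun j h1 h2 => hno j (by omega) h2)
termination_by m - i

-- no occurrence at all from position i on: the unarmed loop produces nothing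
theorem pvNone_eq (s : List Char) (i a : Nat) (d : Int)
    (hno : ∀ j, i ≤ j → ¬ pvTerm <+: s.drop j)
    : pvLoopB s i false a d = [] := by
  rw [pvLoopB]
  split
  · simp only [reduceIte]
    have hsw : PySem.Chars.startswith (s.drop i) pvTerm = false := by
      rw [Bool.eq_false_iff]
      intro hc
      exact hno i le_rfl ((PySem.Chars.startswith_iff _ _).mp hc)
    rw [hsw]
    simp only [Bool.false_eq_true, if_false]
    exact pvNone_eq s (i+1) a d (fun j h1 => hno j (by omega))
  · rfl
termination_by s.length - i

theorem pvPrefix_len (s : List Char) (k : Nat) (h : pvTerm <+: List.drop k s)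
    : k + 24 ≤ s.length := by
  have h1 : pvTerm.length ≤ (List.drop k s).length := h.length_le
  have h2 : pvTerm.length = 24 := by decide
  simp only [List.length_drop] at h1
  omega

theorem pvGet_of_prefix (s : List Char) (k : Nat) (h : pvTerm <+: List.drop k s)
    (j : Nat) (hj : j < 24) : s[k+j]? = pvTerm[j]? := by
  obtain ⟨t, ht⟩ := h
  have hlen : j < pvTerm.length := by rw [pvTerm_len]; omega
  have : (List.drop k s)[j]? = pvTerm[j]? := by
    rw [← ht]; exact List.getElem?_append_left hlen
  rwa [List.getElem?_drop] at this

-- A's inner find('[', idx) lands on the '[' inside the literal, 22 characters in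
theorem pvFind_bracket (s : List Char) (k : Nat) (hk : k ≤ s.length)
    (h : pvTerm <+: List.drop k s)
    : PySem.Chars.findFrom s ['['] (k : Int) = (k : Int) + 22 := by
  rw [PySem.Chars.findFrom_natCast s ['['] k hk]
  obtain ⟨t, ht⟩ := h
  have hdrop : (List.drop k s).drop 22 = '[' :: '{' :: t := by
    rw [← ht, List.drop_append]
    have h1 : pvTerm.drop 22 = ['[', '{'] := by decide
    have h2 : (22 : Nat) - pvTerm.length = 0 := by decide
    rw [h1, h2]; rfl
  have hocc : ['['] <+: (List.drop k s).drop 22 := by rw [hdrop]; exact ⟨'{' :: t, rfl⟩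
  have hnn : 0 ≤ PySem.Chars.find (List.drop k s) ['['] := by
    rw [PySem.Chars.find_nonneg_iff, ← PySem.Chars.isIn_iff_infix,
      ← PySem.Chars.exists_prefix_drop_iff_isIn]
    exact ⟨22, hocc⟩
  obtain ⟨hpref, hmin⟩ := PySem.Chars.find_spec hnn
  set f := (PySem.Chars.find (List.drop k s) ['[']).toNat with hf
  have hle : f ≤ 22 := by
    by_contra hgt
    exact hmin 22 (by omega) hocc
  have hge : ¬ f < 22 := by
    intro hflt
    obtain ⟨t2, ht2⟩ := hpref
    have hgot : (List.drop k s)[f]? = some '[' := by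
      have : (List.drop k s).drop f = '[' :: t2 := by simpa using ht2.symm
      have h0 : ((List.drop k s).drop f)[0]? = some '[' := by rw [this]; rfl
      rwa [List.getElem?_drop] at h0
    have hterm : (List.drop k s)[f]? = pvTerm[f]? := by
      rw [← ht]; exact List.getElem?_append_left (by rw [pvTerm_len]; omega)
    rw [hterm] at hgot
    exact pvTerm_no_bracket f hflt hgot
  have hfeq : f = 22 := by omega
  have : PySem.Chars.find (List.drop k s) ['['] = (22 : Int) := by omega
  rw [this]
  norm_num

-- main loop correspondence: A's outer loop from `start` equals B's unarmed scan from `start`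
theorem pvMain_eq (s : List Char) (fuel : Nat) : ∀ (start : Nat) (acc : List (List Char)),
    start ≤ s.length → s.length + 1 ≤ fuel + start →
    pvOuterA s fuel start acc = acc ++ pvLoopB s start false 0 0 := by
  induction fuel with
  | zero => intro start acc h1 h2; omega
  | succ fuel ih =>
    intro start acc h1 h2
    by_cases hidx : PySem.Chars.findFrom s pvTerm (start : Int) = -1
    · have hno : ∀ j, start ≤ j → ¬ pvTerm <+: s.drop j := by
        intro j hj hpre
        have hinf : pvTerm <:+: s.drop start := by
          rw [← PySem.Chars.isIn_iff_infix, ← PySem.Chars.exists_prefix_drop_iff_isIn]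
          refine ⟨j - start, ?_⟩
          rw [List.drop_drop]
          have hjs : start + (j - start) = j := by omega
          rwa [hjs]
        exact ((PySem.Chars.findFrom_natCast_eq_neg_one_iff s pvTerm start h1).mp hidx) hinf
      rw [pvNone_eq s start 0 0 hno]
      simp [pvOuterA, hidx]
    · obtain ⟨hks, hpref, hmin⟩ := PySem.Chars.findFrom_natCast_spec s pvTerm start h1 hidx
      set K := (PySem.Chars.findFrom s pvTerm (start : Int)).toNat with hK
      have hnn : 0 ≤ PySem.Chars.findFrom s pvTerm (start : Int) := le_trans (by positivity) hks
      have hKidx : PySem.Chars.findFrom s pvTerm (start : Int) = (K : Int) :=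
        (Int.toNat_of_nonneg hnn).symm
      have h24 : K + 24 ≤ s.length := pvPrefix_len s K hpref
      have hstartK : start ≤ K := by omega
      have hbr : PySem.Chars.findFrom s ['['] (K : Int) = (K : Int) + 22 :=
        pvFind_bracket s K (by omega) hpref
      have hbrne : ((K : Int) + 22) ≠ -1 := by omega
      have htn : ((K : Int) + 22).toNat = K + 22 := by omega
      -- the char at K+22 is '['
      have hch : s[K+22]? = some '[' := by
        have := pvGet_of_prefix s K hpref 22 (by omega)
        simpa using this
      have hch' : ∀ (hlt : K + 22 < s.length), s[K+22] = '[' := by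
        intro hlt
        have := hch
        rw [List.getElem?_eq_getElem hlt] at this
        exact Option.some_injective _ this
      have hinner : pvInnerA s (K+22) 0 = pvInnerA s (K+23) 1 := by
        rw [pvInnerA]
        have hlt : K + 22 < s.length := by omega
        rw [dif_pos hlt, if_pos (hch' hlt)]
        norm_num
      -- unfold A one step
      simp only [pvOuterA, hKidx, hbr, htn, hinner]
      rw [if_neg (by omega : ¬ ((K : Int) = -1)), if_neg hbrne]
      -- B side: skip to K, then fire
      rw [pvSkip_eq s start K 0 0 hstartK (by omega)
        (fun j hj1 hj2 => hmin j hj1 (by omega))]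
      rw [pvLoopB, dif_pos (by omega : K < s.length), if_pos rfl,
        if_pos ((PySem.Chars.startswith_iff _ _).mpr hpref), pvArmed_eq]
      cases hc : pvInnerA s (K+23) 1 with
      | none => simp
      | some c =>
        have hb := pvInnerA_bounds s (K+23) 1 c hc
        have hredA : (match (some c : Option Nat) with
            | some close => pvOuterA s fuel (close + 1)
                (acc ++ [PySem.List.slice s (some ((K : Int) + 22)) (some ((close : Int) + 1))])
            | none => acc) =
            pvOuterA s fuel (c + 1)
              (acc ++ [PySem.List.slice s (some ((K : Int) + 22)) (some ((c : Int) + 1))]) := rfl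
        have hredB : (match (some c : Option Nat) with
            | none => ([] : List (List Char))
            | some c => PySem.List.slice s (some ((K + 22 : Nat) : Int)) (some ((c : Int) + 1)) ::
                pvLoopB s (c+1) false (K+22) 0) =
            PySem.List.slice s (some ((K + 22 : Nat) : Int)) (some ((c : Int) + 1)) ::
              pvLoopB s (c+1) false (K+22) 0 := rfl
        rw [hredA, hredB]
        rw [ih (c+1) (acc ++ [PySem.List.slice s (some ((K : Int) + 22)) (some ((c : Int) + 1))])
          (by omega) (by omega)]
        rw [pvLoopB_unarmed_irrel s (c+1) (K+22) 0 0 0]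
        have hcast : ((K : Int) + 22) = (((K + 22 : Nat) : Int)) := by push_cast; ring
        rw [hcast]
        simp

-- ===== VERDICT (by name: the statement is the Claim_ definition above) =====
theorem extract_specification_groups_from_text_spec : Claim_equal_extract_specification_groups_from_text := by
  intro text _
  unfold Spec_extract_specification_groups_from_text
  unfold extract_specification_groups_from_text extract_specification_groups_from_text_alt
  rw [pvMain_eq text.toList (text.toList.length + 2) 0 [] (by omega) (by omega)]
  simp
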